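-- pv_equiv track=rewrite | github.com/NickL52/DataStructures | HW2.py | LR_string
-- ===== SOURCE A (Python) =====
-- import math
--
-- def LR_string(string, reps):
--     if reps == 0:
--         return string
--     if len(string) == 1:
--         beg = 0
--         if string[0] == 'L':
--             mid = 'R'
--         else:
--             mid = 'L'
--     else:
--         beg = math.floor(len(string)/2)
--         if string[beg] == 'L':
--             mid = 'R'
--         else:
--             mid = 'L'
--     return LR_string(string + 'L' + string[:beg] + mid + string[(beg + 1):], reps-1)
-- ===== SOURCE B (Python) =====
-- def LR_string(string, reps):
--     # Iterative form: apply the growth step reps times in a loop (no recursion).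
--     for _ in range(reps):
--         beg = len(string) // 2
--         mid = 'R' if string[beg] == 'L' else 'L'
--         string = string + 'L' + string[:beg] + mid + string[beg + 1:]
--     return string
-- ===== Notes on version B (the rewrite author's own statement) =====
-- stated objective: simpler
-- what changed: Replaces the tail recursion (with its redundant len==1 branch) by a plain iterative for-loop over range(reps) applying the same growth step; beg is always len//2.
-- outside the precondition, e.g. on LR_string('', 1): A raises IndexError, B raises IndexError; on LR_string('x', -1): A does not finish within the time limit, B returns 'x'
import Mathlib
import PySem

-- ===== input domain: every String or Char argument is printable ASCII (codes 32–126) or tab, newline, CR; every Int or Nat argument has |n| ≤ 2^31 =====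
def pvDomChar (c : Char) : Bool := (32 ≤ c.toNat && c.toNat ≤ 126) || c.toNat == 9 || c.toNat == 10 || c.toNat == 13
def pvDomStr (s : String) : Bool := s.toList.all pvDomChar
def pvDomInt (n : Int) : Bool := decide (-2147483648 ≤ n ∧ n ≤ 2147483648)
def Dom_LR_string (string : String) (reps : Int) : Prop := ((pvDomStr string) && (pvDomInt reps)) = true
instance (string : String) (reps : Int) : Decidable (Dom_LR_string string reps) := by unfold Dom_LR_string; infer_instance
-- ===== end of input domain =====

-- B replaces A's tail recursion (with its redundant len==1 branch) by a plain iterative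
-- loop applying the same growth step reps times; objective: simpler.

-- ===== PORT A =====
-- one recursion step of A's body (beg/mid/concatenation exactly as in the Python)
def LRstepA (s : List Char) : List Char :=
  let beg : Int := if s.length = 1 then 0 else PySem.Int.floordiv (s.length : Int) 2
  -- string[beg]: Python raises IndexError on the empty string (outside Pre_); total form pyGetD
  let mid : Char := if PySem.List.pyGetD s beg ' ' = 'L' then 'R' else 'L'
  s ++ ['L'] ++ PySem.List.slice s none (some beg) ++ [mid] ++ PySem.List.slice s (some (beg + 1)) none

-- A's recursion counts reps down to 0; ported with fuel reps.toNat (Python diverges for reps < 0, outside Pre_)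
def LRgoA : List Char → Nat → List Char
  | s, 0 => s
  | s, n + 1 => LRgoA (LRstepA s) n

def LR_string (string : String) (reps : Int) : String :=
  String.ofList (LRgoA string.toList reps.toNat)

-- ===== PORT B =====
-- one loop-body step of B
def LRstepB (s : List Char) : List Char :=
  let beg : Nat := s.length / 2
  let mid : Char := if PySem.List.pyGetD s (beg : Int) ' ' = 'L' then 'R' else 'L'
  s ++ ['L'] ++ s.take beg ++ [mid] ++ s.drop (beg + 1)

-- for _ in range(reps): string = step(string)
def LR_string_alt (string : String) (reps : Int) : String :=
  String.ofList ((List.range reps.toNat).foldl (fun s _ => LRstepB s) string.toList)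

-- ===== PRECONDITION & SPEC =====
-- Pre_ excludes reps < 0 (A recurses without bound) and the empty string with reps ≠ 0
-- (string[beg] raises IndexError); A raises / returns nothing on exactly these inputs.
def Pre_LR_string (string : String) (reps : Int) : Prop :=
  0 ≤ reps ∧ (reps = 0 ∨ string ≠ "")
instance (string : String) (reps : Int) : Decidable (Pre_LR_string string reps) := by
  unfold Pre_LR_string; infer_instance

def pvWitness_LR_string : String × Int := ("L", 2)

def Spec_LR_string (string : String) (reps : Int) (out : String) : Prop := out = LR_string_alt string reps
instance (string : String) (reps : Int) (out : String) : Decidable (Spec_LR_string string reps out) := by unfold Spec_LR_string; infer_instance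

-- ===== CLAIM (what is proved, stated in full; the proofs are below) =====
def Claim_equal_LR_string : Prop := ∀ (string : String) (reps : Int), Dom_LR_string string reps → Pre_LR_string string reps → Spec_LR_string string reps (LR_string string reps)

-- ===== LEMMAS AND PROOFS =====

-- the two step functions agree on every string (A's len==1 branch also yields beg = len // 2 = 0)
lemma LRstep_eq (s : List Char) : LRstepA s = LRstepB s := by
  have hbeg : (if s.length = 1 then (0 : Int) else PySem.Int.floordiv (s.length : Int) 2)
      = ((s.length / 2 : Nat) : Int) := by
    by_cases h : s.length = 1
    · simp [h]
    · simp [h]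
  have hone : ((s.length / 2 : Nat) : Int) + 1 = ((s.length / 2 + 1 : Nat) : Int) := by
    push_cast; ring
  show (let beg : Int := if s.length = 1 then 0 else PySem.Int.floordiv (s.length : Int) 2
        let mid : Char := if PySem.List.pyGetD s beg ' ' = 'L' then 'R' else 'L'
        s ++ ['L'] ++ PySem.List.slice s none (some beg) ++ [mid]
          ++ PySem.List.slice s (some (beg + 1)) none) = _
  rw [show (let beg : Int := if s.length = 1 then 0 else PySem.Int.floordiv (s.length : Int) 2
            let mid : Char := if PySem.List.pyGetD s beg ' ' = 'L' then 'R' else 'L'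
            s ++ ['L'] ++ PySem.List.slice s none (some beg) ++ [mid]
              ++ PySem.List.slice s (some (beg + 1)) none)
        = s ++ ['L'] ++ PySem.List.slice s none (some ((s.length / 2 : Nat) : Int))
            ++ [if PySem.List.pyGetD s ((s.length / 2 : Nat) : Int) ' ' = 'L' then 'R' else 'L']
            ++ PySem.List.slice s (some (((s.length / 2 : Nat) : Int) + 1)) none from by rw [hbeg]]
  rw [hone, PySem.List.slice_to_natCast, PySem.List.slice_from_natCast]
  rfl

-- A's fuel recursion is B's fold over range n
lemma LRgoA_eq_foldl (n : Nat) (s : List Char) :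
    LRgoA s n = (List.range n).foldl (fun s _ => LRstepB s) s := by
  induction n generalizing s with
  | zero => simp [LRgoA]
  | succ n ih =>
    rw [List.range_succ_eq_map]
    simp only [List.foldl_cons, List.foldl_map]
    rw [LRgoA, LRstep_eq, ih]

-- ===== VERDICT (by name: the statement is the Claim_ definition above) =====
theorem LR_string_spec : Claim_equal_LR_string := by
  intro string reps _ _
  unfold Spec_LR_string LR_string LR_string_alt
  rw [LRgoA_eq_foldl]
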